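-- pv_equiv track=rewrite | github.com/ygyang11/agent_harness | src/agent_harness/utils/token_counter.py | _resolve_encoding_name
-- ===== SOURCE A (Python) =====
-- _MODEL_ENCODING_MAP: dict[str, str] = {
--     "gpt-4o": "o200k_base",
--     "gpt-4o-mini": "o200k_base",
--     "gpt-4-turbo": "cl100k_base",
--     "gpt-4": "cl100k_base",
--     "gpt-3.5-turbo": "cl100k_base",
--     "gpt-5": "o200k_base",
--     "gpt-5-mini": "o200k_base",
--     # Anthropic models: use cl100k_base as approximation
--     "claude-3-opus": "cl100k_base",
--     "claude-3-sonnet": "cl100k_base",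
--     "claude-3-haiku": "cl100k_base",
--     "claude-3.5-sonnet": "cl100k_base",
--     "claude-4-sonnet": "cl100k_base",
--     "claude-4": "cl100k_base",
--     "claude-4.5": "cl100k_base",
--     "claude-5": "cl100k_base",
--     "claude-6": "cl100k_base",
-- }
--
-- _PREFIX_ENCODING_MAP: list[tuple[str, str]] = [
--     ("gpt-5", "o200k_base"),
--     ("gpt-4o", "o200k_base"),
--     ("gpt-4", "cl100k_base"),
--     ("gpt-3.5", "cl100k_base"),
--     ("claude-", "cl100k_base"),
-- ]
--
-- DEFAULT_ENCODING = "cl100k_base"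
--
-- def _resolve_encoding_name(model: str) -> str:
--     """Resolve tokenizer encoding name for a model."""
--     encoding_name = _MODEL_ENCODING_MAP.get(model)
--     if encoding_name is not None:
--         return encoding_name
--
--     for prefix, enc in _PREFIX_ENCODING_MAP:
--         if model.startswith(prefix):
--             return enc
--     return DEFAULT_ENCODING
-- ===== SOURCE B (Python) =====
-- def _resolve_encoding_name(model: str) -> str:
--     """Resolve tokenizer encoding name for a model."""
--     # Every mapping that yields o200k_base is exactly a gpt-5* or gpt-4o* model;
--     # everything else (exact keys, other prefixes, the default) is cl100k_base.
--     if model.startswith(("gpt-5", "gpt-4o")):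
--         return "o200k_base"
--     return "cl100k_base"
-- ===== Notes on version B (the rewrite author's own statement) =====
-- stated objective: simpler
-- what changed: B drops both tables: the exact-key dict and the ordered prefix scan collapse to one boolean test, since every entry yielding o200k_base is exactly a gpt-5*/gpt-4o* model and every other outcome (all other keys, prefixes and the default) is cl100k_base.
import Mathlib
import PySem

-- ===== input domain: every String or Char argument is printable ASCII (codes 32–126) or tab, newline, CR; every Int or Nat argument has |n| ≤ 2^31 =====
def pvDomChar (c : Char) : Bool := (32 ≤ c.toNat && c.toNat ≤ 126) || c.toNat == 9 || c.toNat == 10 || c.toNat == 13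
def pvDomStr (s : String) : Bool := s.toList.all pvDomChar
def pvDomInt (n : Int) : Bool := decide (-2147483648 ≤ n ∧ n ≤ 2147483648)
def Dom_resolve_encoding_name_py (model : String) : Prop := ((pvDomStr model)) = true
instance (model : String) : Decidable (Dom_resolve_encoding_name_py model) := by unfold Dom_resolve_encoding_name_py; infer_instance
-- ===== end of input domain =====

-- B replaces A's exact-key dict plus ordered prefix scan by a single boolean prefix test; objective: simpler.

-- ===== PORT A =====
def pvModelEncodingMap : PySem.Dict String String := PySem.Dict.ofList
  [ ("gpt-4o", "o200k_base"), ("gpt-4o-mini", "o200k_base"), ("gpt-4-turbo", "cl100k_base"),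
    ("gpt-4", "cl100k_base"), ("gpt-3.5-turbo", "cl100k_base"), ("gpt-5", "o200k_base"),
    ("gpt-5-mini", "o200k_base"), ("claude-3-opus", "cl100k_base"), ("claude-3-sonnet", "cl100k_base"),
    ("claude-3-haiku", "cl100k_base"), ("claude-3.5-sonnet", "cl100k_base"), ("claude-4-sonnet", "cl100k_base"),
    ("claude-4", "cl100k_base"), ("claude-4.5", "cl100k_base"), ("claude-5", "cl100k_base"),
    ("claude-6", "cl100k_base") ]

def pvPrefixEncodingMap : List (String × String) :=
  [ ("gpt-5", "o200k_base"), ("gpt-4o", "o200k_base"), ("gpt-4", "cl100k_base"),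
    ("gpt-3.5", "cl100k_base"), ("claude-", "cl100k_base") ]

def pvDefaultEncoding : String := "cl100k_base"

-- the 'for prefix, enc in _PREFIX_ENCODING_MAP' loop with early return
def pvPrefixScan (model : String) : List (String × String) → String
  | [] => pvDefaultEncoding
  | (pre, enc) :: rest => if PySem.Str.startswith model pre then enc else pvPrefixScan model rest

def resolve_encoding_name_py (model : String) : String :=
  match pvModelEncodingMap.get? model with
  | some encoding_name => encoding_name
  | none => pvPrefixScan model pvPrefixEncodingMap

-- ===== PORT B =====
def resolve_encoding_name_py_alt (model : String) : String :=
  if PySem.Str.startswith model "gpt-5" || PySem.Str.startswith model "gpt-4o" then "o200k_base"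
  else "cl100k_base"

-- ===== PRECONDITION & SPEC =====
def Spec_resolve_encoding_name_py (model : String) (out : String) : Prop := out = resolve_encoding_name_py_alt model
instance (model : String) (out : String) : Decidable (Spec_resolve_encoding_name_py model out) := by unfold Spec_resolve_encoding_name_py; infer_instance

-- ===== CLAIM (what is proved, stated in full; the proofs are below) =====
def Claim_equal_resolve_encoding_name_py : Prop := ∀ (model : String), Dom_resolve_encoding_name_py model → Spec_resolve_encoding_name_py model (resolve_encoding_name_py model)

-- ===== LEMMAS AND PROOFS =====

-- ===== VERDICT (by name: the statement is the Claim_ definition above) =====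
theorem resolve_encoding_name_py_spec : Claim_equal_resolve_encoding_name_py := by
  intro model _
  unfold Spec_resolve_encoding_name_py resolve_encoding_name_py resolve_encoding_name_py_alt
  rw [show pvModelEncodingMap = PySem.Dict.mk
    [ ("gpt-4o", "o200k_base"), ("gpt-4o-mini", "o200k_base"), ("gpt-4-turbo", "cl100k_base"),
      ("gpt-4", "cl100k_base"), ("gpt-3.5-turbo", "cl100k_base"), ("gpt-5", "o200k_base"),
      ("gpt-5-mini", "o200k_base"), ("claude-3-opus", "cl100k_base"), ("claude-3-sonnet", "cl100k_base"),
      ("claude-3-haiku", "cl100k_base"), ("claude-3.5-sonnet", "cl100k_base"), ("claude-4-sonnet", "cl100k_base"),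
      ("claude-4", "cl100k_base"), ("claude-4.5", "cl100k_base"), ("claude-5", "cl100k_base"),
      ("claude-6", "cl100k_base") ] from rfl]
  cases h : (PySem.Dict.mk
    [ ("gpt-4o", "o200k_base"), ("gpt-4o-mini", "o200k_base"), ("gpt-4-turbo", "cl100k_base"),
      ("gpt-4", "cl100k_base"), ("gpt-3.5-turbo", "cl100k_base"), ("gpt-5", "o200k_base"),
      ("gpt-5-mini", "o200k_base"), ("claude-3-opus", "cl100k_base"), ("claude-3-sonnet", "cl100k_base"),
      ("claude-3-haiku", "cl100k_base"), ("claude-3.5-sonnet", "cl100k_base"), ("claude-4-sonnet", "cl100k_base"),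
      ("claude-4", "cl100k_base"), ("claude-4.5", "cl100k_base"), ("claude-5", "cl100k_base"),
      ("claude-6", "cl100k_base") ]).get? model with
  | some v =>
    have hm := PySem.Dict.mem_items_of_get?_eq_some _ h
    simp only [List.mem_cons, List.not_mem_nil, or_false, Prod.mk.injEq] at hm ⊢
    rcases hm with ⟨rfl,rfl⟩|⟨rfl,rfl⟩|⟨rfl,rfl⟩|⟨rfl,rfl⟩|⟨rfl,rfl⟩|⟨rfl,rfl⟩|⟨rfl,rfl⟩|⟨rfl,rfl⟩|⟨rfl,rfl⟩|⟨rfl,rfl⟩|⟨rfl,rfl⟩|⟨rfl,rfl⟩|⟨rfl,rfl⟩|⟨rfl,rfl⟩|⟨rfl,rfl⟩|⟨rfl,rfl⟩ <;> decide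
  | none =>
    simp only [pvPrefixScan, pvPrefixEncodingMap, pvDefaultEncoding]
    split_ifs <;> simp_all
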